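-- pv_equiv track=rewrite | github.com/thaoyui/KLTN-Final | unified-backend/routes/scans.py | _apply_variable_substitutions
-- ===== SOURCE A (Python) =====
-- def _get_kube_variable_substitutions() -> dict:
--     """Get variable substitutions mapping for Kube-check"""
--     return {
--         '$apiserverconf': '/etc/kubernetes/manifests/kube-apiserver.yaml',
--         '$controllermanagerconf': '/etc/kubernetes/manifests/kube-controller-manager.yaml',
--         '$schedulerconf': '/etc/kubernetes/manifests/kube-scheduler.yaml',
--         '$etcdconf': '/etc/kubernetes/manifests/etcd.yaml',
--         '$apiserverbin': 'kube-apiserver',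
--         '$controllermanagerbin': 'kube-controller-manager',
--         '$schedulerbin': 'kube-scheduler',
--         '$etcdbin': 'etcd',
--         '$kubeletbin': 'kubelet',
--         '$etcddatadir': '/var/lib/etcd',
--         '$schedulerkubeconfig': '/etc/kubernetes/scheduler.conf',
--         '$controllermanagerkubeconfig': '/etc/kubernetes/controller-manager.conf',
--         '$kubeletsvc': '/usr/lib/systemd/system/kubelet.service.d/10-kubeadm.conf',
--         '$kubeletkubeconfig': '/etc/kubernetes/kubelet.conf',
--         '$kubeletconf': '/var/lib/kubelet/config.yaml',
--         '$kubeletcafile': '/etc/kubernetes/pki/ca.crt',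
--         '$proxybin': 'kube-proxy',
--         '$proxykubeconfig': '/var/lib/kube-proxy/kubeconfig.conf',
--         '$proxyconf': '/var/lib/kube-proxy/config.conf'
--     }
--
-- def _apply_variable_substitutions(text: str) -> str:
--     """Apply variable substitutions to shell command text"""
--     if not text:
--         return text
--
--     substitutions = _get_kube_variable_substitutions()
--     result = text
--     for var, value in substitutions.items():
--         result = result.replace(var, value)
--     return result
-- ===== SOURCE B (Python) =====
-- # table keyed by the variable NAME (no '$'); values as in the module
-- _KUBE_VARS = [
--     ("apiserverconf", "/etc/kubernetes/manifests/kube-apiserver.yaml"),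
--     ("controllermanagerconf", "/etc/kubernetes/manifests/kube-controller-manager.yaml"),
--     ("schedulerconf", "/etc/kubernetes/manifests/kube-scheduler.yaml"),
--     ("etcdconf", "/etc/kubernetes/manifests/etcd.yaml"),
--     ("apiserverbin", "kube-apiserver"),
--     ("controllermanagerbin", "kube-controller-manager"),
--     ("schedulerbin", "kube-scheduler"),
--     ("etcdbin", "etcd"),
--     ("kubeletbin", "kubelet"),
--     ("etcddatadir", "/var/lib/etcd"),
--     ("schedulerkubeconfig", "/etc/kubernetes/scheduler.conf"),
--     ("controllermanagerkubeconfig", "/etc/kubernetes/controller-manager.conf"),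
--     ("kubeletsvc", "/usr/lib/systemd/system/kubelet.service.d/10-kubeadm.conf"),
--     ("kubeletkubeconfig", "/etc/kubernetes/kubelet.conf"),
--     ("kubeletconf", "/var/lib/kubelet/config.yaml"),
--     ("kubeletcafile", "/etc/kubernetes/pki/ca.crt"),
--     ("proxybin", "kube-proxy"),
--     ("proxykubeconfig", "/var/lib/kube-proxy/kubeconfig.conf"),
--     ("proxyconf", "/var/lib/kube-proxy/config.conf"),
-- ]
--
--
-- def _apply_variable_substitutions(text: str) -> str:
--     """Split the text once at every '$' and resolve each piece against the
--     (prefix-free) variable-name table, instead of one full-text replace pass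
--     per variable."""
--     if not text:
--         return text
--     parts = text.split('$')
--     out = [parts[0]]
--     for seg in parts[1:]:
--         for name, value in _KUBE_VARS:
--             if seg.startswith(name):
--                 out.append(value + seg[len(name):])
--                 break
--         else:
--             out.append('$' + seg)
--     return ''.join(out)
-- ===== Notes on version B (the rewrite author's own statement) =====
-- stated objective: alternative
-- what changed: B splits the text once at every '$' and resolves each resulting segment against a table keyed by the bare variable name (prefix-free), instead of A's 19 sequential full-text str.replace passes.
-- outside the precondition, e.g. on _apply_variable_substitutions('$$etcdbindatadir'): A returns '/var/lib/etcd', B returns '$etcddatadir'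
import Mathlib
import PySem

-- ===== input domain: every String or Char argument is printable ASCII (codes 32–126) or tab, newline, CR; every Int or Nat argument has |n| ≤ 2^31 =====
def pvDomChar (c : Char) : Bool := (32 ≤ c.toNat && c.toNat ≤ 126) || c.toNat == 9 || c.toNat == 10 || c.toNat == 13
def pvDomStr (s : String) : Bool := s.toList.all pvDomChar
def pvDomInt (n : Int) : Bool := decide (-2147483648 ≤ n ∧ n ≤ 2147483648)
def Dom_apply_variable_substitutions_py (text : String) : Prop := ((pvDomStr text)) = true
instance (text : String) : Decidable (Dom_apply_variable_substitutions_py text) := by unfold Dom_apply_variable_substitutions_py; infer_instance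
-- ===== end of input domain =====

-- B splits the text once at every '$' and resolves each segment against a table keyed by the bare
-- variable name, instead of A's chain of 19 sequential full-text replace passes (objective:
-- alternative; equal on Pre_).


-- ===== PORT A =====
-- port of _get_kube_variable_substitutions (A's helper, as in the module)
def kube_substitutions : PySem.Dict String String := PySem.Dict.mk
  [ ("$apiserverconf", "/etc/kubernetes/manifests/kube-apiserver.yaml"),
    ("$controllermanagerconf", "/etc/kubernetes/manifests/kube-controller-manager.yaml"),
    ("$schedulerconf", "/etc/kubernetes/manifests/kube-scheduler.yaml"),
    ("$etcdconf", "/etc/kubernetes/manifests/etcd.yaml"),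
    ("$apiserverbin", "kube-apiserver"),
    ("$controllermanagerbin", "kube-controller-manager"),
    ("$schedulerbin", "kube-scheduler"),
    ("$etcdbin", "etcd"),
    ("$kubeletbin", "kubelet"),
    ("$etcddatadir", "/var/lib/etcd"),
    ("$schedulerkubeconfig", "/etc/kubernetes/scheduler.conf"),
    ("$controllermanagerkubeconfig", "/etc/kubernetes/controller-manager.conf"),
    ("$kubeletsvc", "/usr/lib/systemd/system/kubelet.service.d/10-kubeadm.conf"),
    ("$kubeletkubeconfig", "/etc/kubernetes/kubelet.conf"),
    ("$kubeletconf", "/var/lib/kubelet/config.yaml"),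
    ("$kubeletcafile", "/etc/kubernetes/pki/ca.crt"),
    ("$proxybin", "kube-proxy"),
    ("$proxykubeconfig", "/var/lib/kube-proxy/kubeconfig.conf"),
    ("$proxyconf", "/var/lib/kube-proxy/config.conf") ]

-- A: 'if not text: return text', then one str.replace pass per dict item, in dict order
def apply_variable_substitutions_py (text : String) : String :=
  if text = "" then text
  else (kube_substitutions.items).foldl (fun result pr => PySem.Str.replace result pr.1 pr.2) text

-- ===== PORT B =====
-- B's module table _KUBE_VARS: (variable NAME without '$', value), as char lists
def pvVarTable : List (List Char × List Char) :=
  [ ("apiserverconf".toList, "/etc/kubernetes/manifests/kube-apiserver.yaml".toList),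
    ("controllermanagerconf".toList, "/etc/kubernetes/manifests/kube-controller-manager.yaml".toList),
    ("schedulerconf".toList, "/etc/kubernetes/manifests/kube-scheduler.yaml".toList),
    ("etcdconf".toList, "/etc/kubernetes/manifests/etcd.yaml".toList),
    ("apiserverbin".toList, "kube-apiserver".toList),
    ("controllermanagerbin".toList, "kube-controller-manager".toList),
    ("schedulerbin".toList, "kube-scheduler".toList),
    ("etcdbin".toList, "etcd".toList),
    ("kubeletbin".toList, "kubelet".toList),
    ("etcddatadir".toList, "/var/lib/etcd".toList),
    ("schedulerkubeconfig".toList, "/etc/kubernetes/scheduler.conf".toList),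
    ("controllermanagerkubeconfig".toList, "/etc/kubernetes/controller-manager.conf".toList),
    ("kubeletsvc".toList, "/usr/lib/systemd/system/kubelet.service.d/10-kubeadm.conf".toList),
    ("kubeletkubeconfig".toList, "/etc/kubernetes/kubelet.conf".toList),
    ("kubeletconf".toList, "/var/lib/kubelet/config.yaml".toList),
    ("kubeletcafile".toList, "/etc/kubernetes/pki/ca.crt".toList),
    ("proxybin".toList, "kube-proxy".toList),
    ("proxykubeconfig".toList, "/var/lib/kube-proxy/kubeconfig.conf".toList),
    ("proxyconf".toList, "/var/lib/kube-proxy/config.conf".toList) ]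

-- hand port of text.split('$') (exact for a one-character separator: Python keeps empty pieces,
-- and ''.split('$') = [''] corresponds to the base case)
def pySplitDollar : List Char → List (List Char)
  | [] => [[]]
  | c :: t =>
    if c = '$' then [] :: pySplitDollar t
    else
      match pySplitDollar t with
      | s :: ss => (c :: s) :: ss
      | [] => [[c]]   -- unreachable: pySplitDollar never returns []

-- B's inner 'for name, value in _KUBE_VARS: if seg.startswith(name)' loop
def pvMatchName : List (List Char × List Char) → List Char → Option (List Char × List Char)
  | [], _ => none
  | (nm, v) :: t, seg => if nm.isPrefixOf seg then some (nm, v) else pvMatchName t seg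

-- what B appends to 'out' for one segment after a '$'
def pvSegOut (seg : List Char) : List Char :=
  match pvMatchName pvVarTable seg with
  | some (nm, v) => v ++ seg.drop nm.length
  | none => '$' :: seg

def apply_variable_substitutions_py_alt (text : String) : String :=
  if text = "" then text
  else
    match pySplitDollar text.toList with
    | [] => ""   -- unreachable: split always yields at least one piece
    | p0 :: rest =>
        String.ofList ((rest.foldl (fun out seg => out ++ [pvSegOut seg]) [p0]).flatten)

-- ===== PRECONDITION & SPEC =====
def pvIsLow (c : Char) : Bool := 'a' ≤ c && c ≤ 'z'

def pvPreOK : List Char → Bool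
  | [] => true
  | c :: rest =>
    (if c = '$' then !((rest.dropWhile pvIsLow).head? == some '$') else true) && pvPreOK rest

-- Pre_ excludes texts containing a '$' followed, after only lowercase letters, by another '$':
-- there A's sequential per-variable replace chain can cascade (an earlier pass's replacement value
-- gluing with adjacent text into a later variable token), an accident of the dict's iteration
-- order that no caller relies on; B resolves such texts by its single split.
def Pre_apply_variable_substitutions_py (text : String) : Prop := pvPreOK text.toList = true
instance (text : String) : Decidable (Pre_apply_variable_substitutions_py text) := by
  unfold Pre_apply_variable_substitutions_py; infer_instance

def pvWitness_apply_variable_substitutions_py : String := "ps -ef | grep $apiserverbin ; cat $apiserverconf"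

def Spec_apply_variable_substitutions_py (text : String) (out : String) : Prop := out = apply_variable_substitutions_py_alt text
instance (text : String) (out : String) : Decidable (Spec_apply_variable_substitutions_py text out) := by unfold Spec_apply_variable_substitutions_py; infer_instance

-- ===== CLAIM (what is proved, stated in full; the proofs are below) =====
def Claim_equal_apply_variable_substitutions_py : Prop := ∀ (text : String), Dom_apply_variable_substitutions_py text → Pre_apply_variable_substitutions_py text → Spec_apply_variable_substitutions_py text (apply_variable_substitutions_py text)

-- ===== LEMMAS AND PROOFS =====

-- ---- shared one-pass normal form: pvScan, the single left-to-right scan both sides are reduced to ----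

-- A's keys with their '$', as char lists (proof-side view of A's table)
def pvSubsChars : List (List Char × List Char) :=
  kube_substitutions.items.map (fun pr => (pr.1.toList, pr.2.toList))

def pvFirstMatch : List (List Char × List Char) → List Char → Option (List Char × List Char)
  | [], _ => none
  | (p, v) :: s, cs => if p.isPrefixOf cs then some (p, v) else pvFirstMatch s cs

def pvScan (S : List (List Char × List Char)) : List Char → List Char
  | [] => []
  | c :: rest =>
    if c = '$' then
      match pvFirstMatch S (c :: rest) with
      | some (p, v) => v ++ pvScan S (rest.drop (p.length - 1))
      | none => c :: pvScan S rest
    else c :: pvScan S rest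
  termination_by l => l.length
  decreasing_by
    · simp
    · simp
    · simp

-- ---- A = pvScan on Pre_ ----

-- normal form of PySem.Chars.replace for a nonempty pattern
def pvRepNF (old new : List Char) : List Char → List Char
  | [] => []
  | c :: t => if old.isPrefixOf (c :: t) then new ++ pvRepNF old new (t.drop (old.length - 1)) else c :: pvRepNF old new t
  termination_by l => l.length
  decreasing_by
    · simp
    · simp

lemma pvGo_eq (old new : List Char) (h : old ≠ []) :
    ∀ fuel l acc, l.length ≤ fuel →
      PySem.Chars.replace.go old new fuel l acc = acc.reverse ++ pvRepNF old new l := by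
  have hol : 1 ≤ old.length := by cases old <;> simp_all
  intro fuel
  induction fuel with
  | zero =>
    intro l acc hl
    have : l = [] := by cases l <;> simp_all
    subst this
    simp [PySem.Chars.replace.go, pvRepNF]
  | succ n ih =>
    intro l acc hl
    cases l with
    | nil => simp [PySem.Chars.replace.go, pvRepNF]
    | cons c t =>
      rw [PySem.Chars.replace.go]
      have hd : List.drop old.length (c :: t) = t.drop (old.length - 1) := by
        cases old with
        | nil => simp_all
        | cons o ot => simp
      by_cases hpre : old.isPrefixOf (c :: t)
      · simp only [hpre, if_true]
        rw [ih _ _ (by rw [List.length_drop]; simp only [List.length_cons] at hl ⊢; omega)]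
        simp only [pvRepNF, hpre, if_true, hd]
        simp
      · simp only [hpre, Bool.false_eq_true, if_false]
        rw [ih _ _ (by simp at hl; omega)]
        simp [pvRepNF, hpre]

lemma pvReplace_eq (old new s : List Char) (h : old ≠ []) :
    PySem.Chars.replace s old new = pvRepNF old new s := by
  rw [PySem.Chars.replace]
  have : old.isEmpty = false := by cases old <;> simp_all
  rw [this]
  simpa using pvGo_eq old new h s.length s [] le_rfl

lemma pvRepNF_match (pt v tl : List Char) :
    pvRepNF ('$' :: pt) v (('$' :: pt) ++ tl) = v ++ pvRepNF ('$' :: pt) v tl := by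
  rw [List.cons_append, pvRepNF]
  have hpre : ('$' :: pt).isPrefixOf ('$' :: (pt ++ tl)) = true := by
    rw [List.isPrefixOf_iff_prefix]
    exact List.cons_prefix_cons.mpr ⟨rfl, ⟨tl, rfl⟩⟩
  rw [if_pos hpre]
  simp

lemma pvRepNF_append_left (pt v u X : List Char) (hu : '$' ∉ u) :
    pvRepNF ('$' :: pt) v (u ++ X) = u ++ pvRepNF ('$' :: pt) v X := by
  induction u with
  | nil => simp
  | cons c u' ih =>
    have hc : c ≠ '$' := fun h => hu (by simp [h])
    rw [List.cons_append, pvRepNF]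
    have hpre : ('$' :: pt).isPrefixOf (c :: (u' ++ X)) = false := by
      rw [Bool.eq_false_iff]
      intro h
      rw [List.isPrefixOf_iff_prefix] at h
      exact hc ((List.cons_prefix_cons.mp h).1).symm
    rw [hpre]
    simp only [Bool.false_eq_true, if_false, List.cons_append]
    rw [ih (fun h => hu (by simp [h]))]

lemma pvRepNF_cons_ne (old v : List Char) (pt : List Char) (hold : old = '$' :: pt)
    (c : Char) (hc : c ≠ '$') (t : List Char) :
    pvRepNF old v (c :: t) = c :: pvRepNF old v t := by
  rw [pvRepNF]
  have hpre : old.isPrefixOf (c :: t) = false := by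
    rw [Bool.eq_false_iff]
    intro h
    rw [List.isPrefixOf_iff_prefix, hold] at h
    exact hc ((List.cons_prefix_cons.mp h).1).symm
  rw [hpre]
  simp

lemma pvScan_cons_ne (S : List (List Char × List Char)) (c : Char) (hc : c ≠ '$') (rest : List Char) :
    pvScan S (c :: rest) = c :: pvScan S rest := by
  rw [pvScan, if_neg hc]

lemma pvScan_append_left (S : List (List Char × List Char)) (u X : List Char) (hu : '$' ∉ u) :
    pvScan S (u ++ X) = u ++ pvScan S X := by
  induction u with
  | nil => simp
  | cons c u' ih =>
    rw [List.cons_append, pvScan_cons_ne S c (fun h => hu (by simp [h])) _]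
    rw [ih (fun h => hu (by simp [h]))]
    simp

lemma pvScan_nil_keys : ∀ cs, pvScan [] cs = cs := by
  intro cs
  induction cs with
  | nil => simp [pvScan]
  | cons c rest ih =>
    rw [pvScan]
    by_cases hc : c = '$' <;> simp [hc, pvFirstMatch, ih]

lemma pvFM_append_some (S T : List (List Char × List Char)) (cs : List Char)
    (r : List Char × List Char) (h : pvFirstMatch S cs = some r) :
    pvFirstMatch (S ++ T) cs = some r := by
  induction S with
  | nil => simp [pvFirstMatch] at h
  | cons pr S' ih =>
    obtain ⟨p, v⟩ := pr
    rw [List.cons_append, pvFirstMatch]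
    rw [pvFirstMatch] at h
    by_cases hp : p.isPrefixOf cs <;> simp_all

lemma pvFM_append_none (S T : List (List Char × List Char)) (cs : List Char)
    (h : pvFirstMatch S cs = none) :
    pvFirstMatch (S ++ T) cs = pvFirstMatch T cs := by
  induction S with
  | nil => simp
  | cons pr S' ih =>
    obtain ⟨p, v⟩ := pr
    rw [List.cons_append, pvFirstMatch]
    rw [pvFirstMatch] at h
    by_cases hp : p.isPrefixOf cs <;> simp_all

lemma pvFM_spec (S : List (List Char × List Char)) (cs : List Char)
    (p v : List Char) (h : pvFirstMatch S cs = some (p, v)) :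
    (p, v) ∈ S ∧ p <+: cs := by
  induction S with
  | nil => simp [pvFirstMatch] at h
  | cons pr S' ih =>
    obtain ⟨q, w⟩ := pr
    rw [pvFirstMatch] at h
    by_cases hq : q.isPrefixOf cs
    · rw [if_pos hq] at h
      obtain ⟨rfl, rfl⟩ : q = p ∧ w = v := by simpa using h
      exact ⟨by simp, List.isPrefixOf_iff_prefix.mp hq⟩
    · rw [if_neg hq] at h
      obtain ⟨h1, h2⟩ := ih h
      exact ⟨by simp [h1], h2⟩

lemma pvPre_cons (c : Char) (rest : List Char) (h : pvPreOK (c :: rest) = true) :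
    pvPreOK rest = true := by
  rw [pvPreOK, Bool.and_eq_true] at h
  exact h.2

lemma pvPre_drop (k : ℕ) (l : List Char) (h : pvPreOK l = true) :
    pvPreOK (l.drop k) = true := by
  induction k generalizing l with
  | zero => simpa using h
  | succ n ih =>
    cases l with
    | nil => simpa using h
    | cons c rest => exact ih rest (pvPre_cons c rest h)

lemma pvPre_dollar (rest : List Char) (h : pvPreOK ('$' :: rest) = true) :
    ¬ (rest.dropWhile pvIsLow).head? = some '$' := by
  rw [pvPreOK, Bool.and_eq_true, if_pos rfl] at h
  intro hc
  rw [hc] at h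
  simp at h

lemma pvNoPrefix (S : List (List Char × List Char)) (pt rest : List Char)
    (hlow : ∀ c ∈ pt, pvIsLow c = true)
    (hnp : ¬ pt <+: rest)
    (hpre : ¬ (rest.dropWhile pvIsLow).head? = some '$') :
    ¬ pt <+: pvScan S rest := by
  intro hp
  set w := rest.takeWhile (fun c => c != '$') with hw
  set z := rest.dropWhile (fun c => c != '$') with hz
  have hrest : w ++ z = rest := List.takeWhile_append_dropWhile
  have hwd : '$' ∉ w := by
    intro hmem
    have := List.mem_takeWhile_imp (by rw [← hw]; exact hmem)
    simp at this
  have hscan : pvScan S rest = w ++ pvScan S z := by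
    have h0 := pvScan_append_left S w z hwd
    rw [hrest] at h0
    exact h0
  rw [hscan] at hp
  by_cases hle : pt.length ≤ w.length
  · have hptw : pt <+: w :=
      List.prefix_of_prefix_length_le hp (w.prefix_append _) hle
    exact hnp (hptw.trans (hrest ▸ (w.prefix_append z)))
  · have hwpt : w <+: pt :=
      List.prefix_of_prefix_length_le (w.prefix_append _) hp (by omega)
    have hwlow : ∀ c ∈ w, pvIsLow c = true := fun c hc => hlow c (hwpt.subset hc)
    cases hzc : z with
    | nil =>
      rw [hzc] at hp
      have : pt.length ≤ w.length := by
        have := hp.length_le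
        simpa [pvScan] using this
      omega
    | cons d z' =>
      have hd : d = '$' := by
        have := List.head?_dropWhile_not (fun c => c != '$') rest
        rw [← hz, hzc] at this
        simpa using this
      have : rest.dropWhile pvIsLow = '$' :: z' := by
        rw [← hrest, List.dropWhile_append]
        have h1 : w.dropWhile pvIsLow = [] := List.dropWhile_eq_nil_iff.mpr hwlow
        rw [h1]
        simp only [List.isEmpty_nil, if_true]
        rw [hzc, hd]
        rw [List.dropWhile_cons_of_neg (by simp [pvIsLow])]
      exact hpre (by rw [this]; rfl)

lemma pvLow_ne_dollar (c : Char) (h : pvIsLow c = true) : c ≠ '$' := by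
  intro hc
  subst hc
  simp [pvIsLow] at h

lemma pvStep (p v pt : List Char) (hp : p = '$' :: pt) (hlow : ∀ c ∈ pt, pvIsLow c = true)
    (S : List (List Char × List Char))
    (hS : ∀ pr ∈ S, (∃ qt, pr.1 = '$' :: qt ∧ ∀ c ∈ qt, pvIsLow c = true) ∧ '$' ∉ pr.2) :
    ∀ cs, pvPreOK cs = true → pvRepNF p v (pvScan S cs) = pvScan (S ++ [(p, v)]) cs := by
  have main : ∀ n cs, cs.length ≤ n → pvPreOK cs = true →
      pvRepNF p v (pvScan S cs) = pvScan (S ++ [(p, v)]) cs := by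
    intro n
    induction n with
    | zero =>
      intro cs hl _
      have : cs = [] := by cases cs <;> simp_all
      subst this
      simp [pvScan, pvRepNF]
    | succ n ih =>
      intro cs hl hcs
      cases cs with
      | nil => simp [pvScan, pvRepNF]
      | cons c rest =>
        by_cases hc : c = '$'
        · subst hc
          rw [pvScan, if_pos rfl]
          conv_rhs => rw [pvScan, if_pos rfl]
          cases hm : pvFirstMatch S ('$' :: rest) with
          | some r =>
            obtain ⟨q, w⟩ := r
            obtain ⟨hqmem, hqpre⟩ := pvFM_spec S _ q w hm
            obtain ⟨⟨qt, hq0, hqlow⟩, hw0⟩ := hS _ hqmem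
            have hq : q = '$' :: qt := hq0
            have hw : '$' ∉ w := hw0
            rw [pvFM_append_some S _ _ _ hm]
            show pvRepNF p v (w ++ pvScan S (List.drop (q.length - 1) rest))
              = w ++ pvScan (S ++ [(p, v)]) (List.drop (q.length - 1) rest)
            obtain ⟨tail, htail⟩ := hqpre
            have hrest : rest = qt ++ tail := by
              rw [hq] at htail
              simpa using htail.symm
            have hdrop : List.drop (q.length - 1) rest = tail := by
              rw [hq, hrest]
              simp
            rw [hdrop]
            have htl : tail.length ≤ n := by
              have := congrArg List.length hrest
              simp at this hl
              omega
            have hptail : pvPreOK tail = true := by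
              have h2 : tail = rest.drop qt.length := by rw [hrest]; simp
              rw [h2]
              exact pvPre_drop _ _ (pvPre_cons _ _ hcs)
            rw [hp, pvRepNF_append_left pt v w _ hw, ← hp]
            congr 1
            exact ih tail htl hptail
          | none =>
            rw [pvFM_append_none S _ _ hm]
            by_cases hpp : p.isPrefixOf ('$' :: rest)
            · have hfm : pvFirstMatch [(p, v)] ('$' :: rest) = some (p, v) := by
                rw [pvFirstMatch, if_pos hpp]
              rw [hfm]
              show pvRepNF p v ('$' :: pvScan S rest)
                = v ++ pvScan (S ++ [(p, v)]) (List.drop (p.length - 1) rest)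
              obtain ⟨tail, htail⟩ := List.isPrefixOf_iff_prefix.mp hpp
              have hrest : rest = pt ++ tail := by
                rw [hp] at htail
                simpa using htail.symm
              have hptd : '$' ∉ pt := fun hmem => pvLow_ne_dollar '$' (hlow _ hmem) rfl
              have htl : tail.length ≤ n := by
                have := congrArg List.length hrest
                simp at this hl
                omega
              have hptail : pvPreOK tail = true := by
                have h2 : tail = rest.drop pt.length := by rw [hrest]; simp
                rw [h2]
                exact pvPre_drop _ _ (pvPre_cons _ _ hcs)
              have hdrop : List.drop (p.length - 1) rest = tail := by
                rw [hp, hrest]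
                simp
              rw [hdrop]
              rw [hrest, pvScan_append_left S pt tail hptd]
              rw [hp, ← List.cons_append, pvRepNF_match]
              congr 1
              rw [← hp]
              exact ih tail htl hptail
            · have hfm : pvFirstMatch [(p, v)] ('$' :: rest) = none := by
                rw [pvFirstMatch, if_neg hpp, pvFirstMatch]
              rw [hfm]
              show pvRepNF p v ('$' :: pvScan S rest) = '$' :: pvScan (S ++ [(p, v)]) rest
              have hnp : ¬ pt <+: rest := by
                intro h
                apply hpp
                rw [List.isPrefixOf_iff_prefix, hp]
                exact List.cons_prefix_cons.mpr ⟨rfl, h⟩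
              have hnps := pvNoPrefix S pt rest hlow hnp (pvPre_dollar rest hcs)
              rw [pvRepNF]
              have hpf : p.isPrefixOf ('$' :: pvScan S rest) = false := by
                rw [Bool.eq_false_iff]
                intro h
                rw [List.isPrefixOf_iff_prefix, hp] at h
                exact hnps (List.cons_prefix_cons.mp h).2
              rw [hpf]
              simp only [Bool.false_eq_true, if_false]
              congr 1
              exact ih rest (by simp at hl; omega) (pvPre_cons _ _ hcs)
        · rw [pvScan_cons_ne S c hc, pvScan_cons_ne _ c hc]
          rw [pvRepNF_cons_ne p v pt hp c hc]
          rw [ih rest (by simp at hl; omega) (pvPre_cons _ _ hcs)]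
  intro cs
  exact main cs.length cs le_rfl

lemma pvFold (L : List (List Char × List Char))
    (hL : ∀ pr ∈ L, (∃ qt, pr.1 = '$' :: qt ∧ ∀ c ∈ qt, pvIsLow c = true) ∧ '$' ∉ pr.2) :
    ∀ cs, pvPreOK cs = true →
      L.foldl (fun s pr => PySem.Chars.replace s pr.1 pr.2) cs = pvScan L cs := by
  induction L using List.reverseRecOn with
  | nil => intro cs _; exact (pvScan_nil_keys cs).symm
  | append_singleton L pr ihL =>
    intro cs hcs
    obtain ⟨p, v⟩ := pr
    obtain ⟨⟨qt, hq0, hqlow⟩, hv0⟩ := hL (p, v) (by simp)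
    have hq : p = '$' :: qt := hq0
    rw [List.foldl_append, List.foldl_cons, List.foldl_nil]
    rw [ihL (fun x hx => hL x (by simp [hx])) cs hcs]
    rw [pvReplace_eq _ _ _ (by rw [hq]; simp)]
    exact pvStep p v qt hq hqlow L (fun x hx => hL x (by simp [hx])) cs hcs

lemma pvKeysBool : pvSubsChars.all
    (fun pr => (pr.1.head? == some '$') && pr.1.tail.all pvIsLow && !pr.2.contains '$') = true := by
  decide

lemma pvKeys : ∀ pr ∈ pvSubsChars, (∃ qt, pr.1 = '$' :: qt ∧ ∀ c ∈ qt, pvIsLow c = true) ∧ '$' ∉ pr.2 := by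
  intro pr hpr
  have h := List.all_eq_true.mp pvKeysBool pr hpr
  simp only [Bool.and_eq_true, beq_iff_eq, Bool.not_eq_true'] at h
  obtain ⟨⟨h1, h2⟩, h3⟩ := h
  constructor
  · refine ⟨pr.1.tail, ?_, ?_⟩
    · cases hc : pr.1 with
      | nil => rw [hc] at h1; simp at h1
      | cons a t =>
        rw [hc] at h1
        simp at h1
        rw [h1]
        simp
    · exact fun c hc => List.all_eq_true.mp h2 c hc
  · intro hmem
    rw [List.contains_eq_mem] at h3
    simp [hmem] at h3

theorem pvMain (cs : List Char) (h : pvPreOK cs = true) :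
    pvSubsChars.foldl (fun s pr => PySem.Chars.replace s pr.1 pr.2) cs = pvScan pvSubsChars cs :=
  pvFold pvSubsChars pvKeys cs h

lemma pvToListFold (L : List (String × String)) (s : String) :
    (L.foldl (fun r pr => PySem.Str.replace r pr.1 pr.2) s).toList
      = (L.map (fun pr => (pr.1.toList, pr.2.toList))).foldl
          (fun cs pr => PySem.Chars.replace cs pr.1 pr.2) s.toList := by
  induction L generalizing s with
  | nil => simp
  | cons pr L ih =>
    simp only [List.foldl_cons, List.map_cons]
    rw [ih]
    congr 1
    exact PySem.Str.toList_replace _ _ _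

-- ---- B = pvScan (unconditionally) ----

-- A's table with its '$' stripped off each key IS B's table
lemma pvTableLink : pvSubsChars = pvVarTable.map (fun pr => ('$' :: pr.1, pr.2)) := by decide

lemma pvNamesFreeBool : pvVarTable.all (fun pr => !pr.1.contains '$') = true := by decide

lemma pvNamesFree : ∀ pr ∈ pvVarTable, '$' ∉ pr.1 := by
  intro pr hpr hmem
  have h := List.all_eq_true.mp pvNamesFreeBool pr hpr
  simp only [Bool.not_eq_true'] at h
  rw [List.contains_eq_mem] at h
  simp [hmem] at h

lemma pvFM_map (T : List (List Char × List Char)) (z : List Char) :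
    pvFirstMatch (T.map (fun pr => ('$' :: pr.1, pr.2))) ('$' :: z)
      = (pvMatchName T z).map (fun pr => ('$' :: pr.1, pr.2)) := by
  induction T with
  | nil => simp [pvFirstMatch, pvMatchName]
  | cons pr T ih =>
    obtain ⟨nm, v⟩ := pr
    simp only [List.map_cons, pvFirstMatch, pvMatchName]
    have hpre : ('$' :: nm).isPrefixOf ('$' :: z) = nm.isPrefixOf z := by
      simp [List.isPrefixOf]
    rw [hpre]
    by_cases h : nm.isPrefixOf z <;> simp [h, ih]

lemma pvMN_spec (T : List (List Char × List Char)) (z nm v : List Char)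
    (h : pvMatchName T z = some (nm, v)) : (nm, v) ∈ T ∧ nm <+: z := by
  induction T with
  | nil => simp [pvMatchName] at h
  | cons pr T ih =>
    obtain ⟨q, w⟩ := pr
    rw [pvMatchName] at h
    by_cases hq : q.isPrefixOf z
    · rw [if_pos hq] at h
      obtain ⟨rfl, rfl⟩ : q = nm ∧ w = v := by simpa using h
      exact ⟨by simp, List.isPrefixOf_iff_prefix.mp hq⟩
    · rw [if_neg hq] at h
      obtain ⟨h1, h2⟩ := ih h
      exact ⟨by simp [h1], h2⟩

lemma pvPfx_takeWhile : ∀ (nm z : List Char), '$' ∉ nm →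
    nm.isPrefixOf (z.takeWhile (fun c => c != '$')) = nm.isPrefixOf z := by
  intro nm
  induction nm with
  | nil => intro z _; simp [List.isPrefixOf]
  | cons a nm' ih =>
    intro z hnm
    have ha : a ≠ '$' := fun h => hnm (by simp [h])
    cases z with
    | nil => simp
    | cons b z' =>
      by_cases hb : b = '$'
      · subst hb
        rw [List.takeWhile_cons_of_neg (by simp)]
        have h1 : (a :: nm').isPrefixOf ([] : List Char) = false := by simp [List.isPrefixOf]
        have h2 : (a :: nm').isPrefixOf ('$' :: z') = false := by
          rw [Bool.eq_false_iff]
          intro h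
          rw [List.isPrefixOf_iff_prefix] at h
          exact ha (List.cons_prefix_cons.mp h).1
        rw [h1, h2]
      · rw [List.takeWhile_cons_of_pos (by simp [hb])]
        simp only [List.isPrefixOf]
        rw [ih z' (fun h => hnm (by simp [h]))]

lemma pvMN_takeWhile (T : List (List Char × List Char))
    (hT : ∀ pr ∈ T, '$' ∉ pr.1) (z : List Char) :
    pvMatchName T (z.takeWhile (fun c => c != '$')) = pvMatchName T z := by
  induction T with
  | nil => rfl
  | cons pr T ih =>
    obtain ⟨nm, v⟩ := pr
    rw [pvMatchName, pvMatchName, pvPfx_takeWhile nm z (hT (nm, v) (by simp))]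
    by_cases h : nm.isPrefixOf z
    · simp [h]
    · simp only [h, Bool.false_eq_true, if_false]
      exact ih (fun pr hpr => hT pr (by simp [hpr]))

lemma pySplitDollar_ne_nil : ∀ cs, pySplitDollar cs ≠ [] := by
  intro cs
  cases cs with
  | nil => simp [pySplitDollar]
  | cons c t =>
    rw [pySplitDollar]
    by_cases h : c = '$'
    · simp [h]
    · rw [if_neg h]
      cases pySplitDollar t <;> simp

lemma pySplitDollar_free : ∀ (w : List Char), '$' ∉ w → pySplitDollar w = [w] := by
  intro w
  induction w with
  | nil => intro _; rfl
  | cons c t ih =>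
    intro h
    rw [pySplitDollar, if_neg (fun hc => h (by simp [hc])), ih (fun ht => h (by simp [ht]))]

lemma pySplitDollar_app : ∀ (w z : List Char), '$' ∉ w →
    pySplitDollar (w ++ '$' :: z) = w :: pySplitDollar z := by
  intro w z
  induction w with
  | nil => intro _; simp [pySplitDollar]
  | cons c t ih =>
    intro h
    rw [List.cons_append, pySplitDollar, if_neg (fun hc => h (by simp [hc])),
        ih (fun ht => h (by simp [ht]))]

lemma pvScan_free (S : List (List Char × List Char)) (u : List Char) (hu : '$' ∉ u) :
    pvScan S u = u := by
  have h := pvScan_append_left S u [] hu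
  simpa [pvScan] using h

-- the '$'-headed step: scanning '$' :: z produces exactly B's per-segment outputs
lemma pvScanDollar_free (z : List Char) (hz : '$' ∉ z) :
    pvScan pvSubsChars ('$' :: z) = ((pySplitDollar z).map pvSegOut).flatten := by
  rw [pySplitDollar_free z hz]
  simp only [List.map_cons, List.map_nil, List.flatten_cons, List.flatten_nil, List.append_nil]
  rw [pvScan, if_pos rfl, pvTableLink, pvFM_map]
  rw [pvSegOut]
  cases hm : pvMatchName pvVarTable z with
  | none =>
    simp only [Option.map_none]
    rw [pvScan_free _ z hz]
  | some pr =>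
    obtain ⟨nm, v⟩ := pr
    simp only [Option.map_some]
    have hlen : ('$' :: nm).length - 1 = nm.length := by simp
    rw [hlen, pvScan_free _ _ (fun hmem => hz (List.drop_subset _ _ hmem))]

lemma pvScanDollar : ∀ (n : ℕ) (z : List Char), z.length ≤ n →
    pvScan pvSubsChars ('$' :: z) = ((pySplitDollar z).map pvSegOut).flatten := by
  intro n
  induction n with
  | zero =>
    intro z hz
    have : z = [] := by cases z <;> simp_all
    subst this
    exact pvScanDollar_free [] (by simp)
  | succ n ih =>
    intro z hz
    set s0 := z.takeWhile (fun c => c != '$') with hs0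
    set d := z.dropWhile (fun c => c != '$') with hd
    have hzdec : s0 ++ d = z := List.takeWhile_append_dropWhile
    have hs0free : '$' ∉ s0 := by
      intro hmem
      have := List.mem_takeWhile_imp (by rw [hs0] at hmem; exact hmem)
      simp at this
    cases hdc : d with
    | nil =>
      have hzfree : '$' ∉ z := by
        rw [← hzdec, hdc]
        simpa using hs0free
      exact pvScanDollar_free z hzfree
    | cons c z' =>
      have hc : c = '$' := by
        have := List.head?_dropWhile_not (fun c => c != '$') z
        rw [← hd, hdc] at this
        simpa using this
      subst hc
      have hz' : z = s0 ++ '$' :: z' := by rw [← hzdec, hdc]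
      have hlen : z'.length ≤ n := by
        have := congrArg List.length hz'
        simp at this hz
        omega
      have hsplit : pySplitDollar z = s0 :: pySplitDollar z' := by
        rw [hz']
        exact pySplitDollar_app s0 z' hs0free
      rw [hsplit]
      simp only [List.map_cons, List.flatten_cons]
      rw [pvScan, if_pos rfl, pvTableLink, pvFM_map, ← pvTableLink]
      have hmn0 : pvMatchName pvVarTable s0 = pvMatchName pvVarTable z := by
        rw [hs0]
        exact pvMN_takeWhile pvVarTable pvNamesFree z
      cases hm : pvMatchName pvVarTable z with
      | none =>
        simp only [Option.map_none]
        have hseg : pvSegOut s0 = '$' :: s0 := by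
          rw [pvSegOut, hmn0, hm]
        rw [hseg]
        have hscanz : pvScan pvSubsChars z = s0 ++ pvScan pvSubsChars ('$' :: z') := by
          rw [hz']
          exact pvScan_append_left _ s0 _ hs0free
        rw [hscanz, ih z' hlen]
        simp
      | some pr =>
        obtain ⟨nm, v⟩ := pr
        simp only [Option.map_some]
        obtain ⟨hmem, hpz⟩ := pvMN_spec pvVarTable z nm v hm
        have hnmfree : '$' ∉ nm := pvNamesFree (nm, v) hmem
        have hps0 : nm <+: s0 := by
          have he := pvPfx_takeWhile nm z hnmfree
          rw [← hs0] at he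
          have : nm.isPrefixOf z = true := List.isPrefixOf_iff_prefix.mpr hpz
          rw [this] at he
          exact List.isPrefixOf_iff_prefix.mp he
        have hklen : nm.length ≤ s0.length := hps0.length_le
        have hseg : pvSegOut s0 = v ++ s0.drop nm.length := by
          rw [pvSegOut, hmn0, hm]
        have hlen1 : ('$' :: nm).length - 1 = nm.length := by simp
        rw [hlen1, hseg]
        have hdropz : z.drop nm.length = s0.drop nm.length ++ '$' :: z' := by
          rw [hz', List.drop_append_of_le_length hklen]
        rw [hdropz]
        have hdfree : '$' ∉ s0.drop nm.length :=
          fun hmem2 => hs0free (List.drop_subset _ _ hmem2)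
        rw [pvScan_append_left _ _ _ hdfree, ih z' hlen]
        simp

-- the whole text: pvScan equals B's split-and-join
lemma pvScan_split (cs : List Char) :
    pvScan pvSubsChars cs =
      ((pySplitDollar cs).headD []) ++ (((pySplitDollar cs).tail).map pvSegOut).flatten := by
  set s0 := cs.takeWhile (fun c => c != '$') with hs0
  set d := cs.dropWhile (fun c => c != '$') with hd
  have hzdec : s0 ++ d = cs := List.takeWhile_append_dropWhile
  have hs0free : '$' ∉ s0 := by
    intro hmem
    have := List.mem_takeWhile_imp (by rw [hs0] at hmem; exact hmem)
    simp at this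
  cases hdc : d with
  | nil =>
    have hfree : '$' ∉ cs := by
      rw [← hzdec, hdc]
      simpa using hs0free
    rw [pySplitDollar_free cs hfree, pvScan_free _ cs hfree]
    simp
  | cons c z' =>
    have hc : c = '$' := by
      have := List.head?_dropWhile_not (fun c => c != '$') cs
      rw [← hd, hdc] at this
      simpa using this
    subst hc
    have hcs : cs = s0 ++ '$' :: z' := by rw [← hzdec, hdc]
    rw [hcs, pySplitDollar_app s0 z' hs0free, pvScan_append_left _ s0 _ hs0free,
        pvScanDollar z'.length z' le_rfl]
    simp

-- ===== VERDICT (by name: the statement is the Claim_ definition above) =====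
theorem apply_variable_substitutions_py_spec : Claim_equal_apply_variable_substitutions_py := by
  intro text hdom hpre
  unfold Spec_apply_variable_substitutions_py
  unfold apply_variable_substitutions_py apply_variable_substitutions_py_alt
  by_cases ht : text = ""
  · simp [ht]
  · rw [if_neg ht, if_neg ht]
    have h1 : ((kube_substitutions.items).foldl (fun result pr => PySem.Str.replace result pr.1 pr.2) text).toList
        = pvScan pvSubsChars text.toList := by
      rw [pvToListFold]
      exact pvMain text.toList hpre
    have h2 := pvScan_split text.toList
    cases hs : pySplitDollar text.toList with
    | nil => exact absurd hs (pySplitDollar_ne_nil _)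
    | cons p0 rest =>
      rw [hs] at h2
      simp only [List.headD_cons, List.tail_cons] at h2
      show List.foldl (fun result pr => PySem.Str.replace result pr.1 pr.2) text kube_substitutions.items
          = String.ofList ((rest.foldl (fun out seg => out ++ [pvSegOut seg]) [p0]).flatten)
      rw [PySem.List.foldl_append_singleton_eq_map]
      have h3 : (kube_substitutions.items).foldl (fun result pr => PySem.Str.replace result pr.1 pr.2) text
          = String.ofList (pvScan pvSubsChars text.toList) := by
        rw [← h1, String.ofList_toList]
      rw [h3, h2]
      simp
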